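-- pv_equiv track=rewrite | github.com/ogiekako/pub_polycover | hardness/verify_rust_candidates.py | hole_count
-- ===== SOURCE A (Python) =====
-- from collections import deque, defaultdict
--
-- def parse_rows(rows):
--     n = len(rows)
--     cells = set()
--     for y, row in enumerate(rows):
--         for x, ch in enumerate(row):
--             if ch == '1':
--                 cells.add((x, y))
--     return cells, n
--
-- def bbox(cells):
--     xs = [x for x, _ in cells]
--     ys = [y for _, y in cells]
--     return min(xs), max(xs), min(ys), max(ys)
--
-- def hole_count(rows):
--     cells, n = parse_rows(rows)
--     mnx, mxx, mny, mxy = bbox(cells)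
--     mnx -= 1
--     mxx += 1
--     mny -= 1
--     mxy += 1
--     ext = set(cells)
--     q = deque([(mnx, mny)])
--     vis = {(mnx, mny)}
--     while q:
--         x, y = q.popleft()
--         for dx, dy in ((1, 0), (-1, 0), (0, 1), (0, -1)):
--             nx, ny = x + dx, y + dy
--             if nx < mnx or nx > mxx or ny < mny or ny > mxy:
--                 continue
--             p = (nx, ny)
--             if p in ext or p in vis:
--                 continue
--             vis.add(p)
--             q.append(p)
--     holes = 0
--     for y in range(mny, mxy + 1):
--         for x in range(mnx, mxx + 1):
--             p = (x, y)
--             if p not in ext and p not in vis: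
--                 holes += 1
--     return holes
-- ===== SOURCE B (Python) =====
-- def hole_count(rows):
--     cells = {(x, y) for y, row in enumerate(rows) for x, ch in enumerate(row) if ch == '1'}
--     mnx = min(x for x, _ in cells) - 1
--     mxx = max(x for x, _ in cells) + 1
--     mny = min(y for _, y in cells) - 1
--     mxy = max(y for _, y in cells) + 1
--     # Gauss-Seidel saturation: sweep the padded box, marking empty cells
--     # adjacent to an already marked cell, until a sweep changes nothing.
--     vis = {(mnx, mny)}
--     while True:
--         changed = False
--         for y in range(mny, mxy + 1):
--             for x in range(mnx, mxx + 1):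
--                 p = (x, y)
--                 if p in cells or p in vis:
--                     continue
--                 if (x - 1, y) in vis or (x + 1, y) in vis or (x, y - 1) in vis or (x, y + 1) in vis:
--                     vis.add(p)
--                     changed = True
--         if not changed:
--             break
--     holes = 0
--     for y in range(mny, mxy + 1):
--         for x in range(mnx, mxx + 1):
--             if (x, y) not in cells and (x, y) not in vis:
--                 holes += 1
--     return holes
-- ===== Notes on version B (the rewrite author's own statement) =====
-- stated objective: alternative
-- what changed: The BFS/deque flood fill from the padded corner is replaced by repeated whole-grid Gauss-Seidel sweeps that mark empty cells adjacent to an already-marked cell until a sweep changes nothing; holes are the empty cells never marked. Pre_ only excludes inputs with no '1' cell, on which both A and B raise ValueError (min of an empty sequence).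
import Mathlib
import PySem

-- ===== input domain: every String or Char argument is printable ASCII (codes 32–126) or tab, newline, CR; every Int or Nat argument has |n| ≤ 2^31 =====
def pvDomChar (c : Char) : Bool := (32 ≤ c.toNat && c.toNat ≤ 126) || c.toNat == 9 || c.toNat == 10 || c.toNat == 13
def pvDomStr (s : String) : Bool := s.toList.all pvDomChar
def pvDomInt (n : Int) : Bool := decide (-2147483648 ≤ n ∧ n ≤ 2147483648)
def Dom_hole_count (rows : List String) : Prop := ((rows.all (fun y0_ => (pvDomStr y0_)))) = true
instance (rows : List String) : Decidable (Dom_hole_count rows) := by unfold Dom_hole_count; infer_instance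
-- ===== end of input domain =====

-- B replaces A's BFS/deque flood fill by iterated whole-grid sweeps to a fixpoint
-- (alternative algorithm, same return value; Pre_ excludes inputs where both raise ValueError).

-- ===== PORT A =====
def pvDirsA : List (Int × Int) := [(1, 0), (-1, 0), (0, 1), (0, -1)]

def pvParseRows (rows : List String) : PySem.Set (Int × Int) × Int :=
  ((PySem.List.enumerate rows 0).foldl (fun s yr =>
      (PySem.List.enumerate yr.2.toList 0).foldl (fun s xc =>
        if xc.2 = '1' then PySem.Set.add s (xc.1, yr.1) else s) s)
    PySem.Set.empty, (rows.length : Int))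

-- bbox: Python's min/max raise ValueError on an empty cell set → none (excluded by Pre_)
def pvBbox (cells : List (Int × Int)) : Option (Int × Int × Int × Int) :=
  let xs := cells.map (fun c => c.1)
  let ys := cells.map (fun c => c.2)
  match PySem.List.min? xs (fun v => v), PySem.List.max? xs (fun v => v),
        PySem.List.min? ys (fun v => v), PySem.List.max? ys (fun v => v) with
  | some a, some b, some c, some d => some (a, b, c, d)
  | _, _, _, _ => none

def pvBfsStep (mnx mxx mny mxy : Int) (ext : List (Int × Int)) (c : Int × Int)
    (s : List (Int × Int) × PySem.Set (Int × Int)) (d : Int × Int) :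
    List (Int × Int) × PySem.Set (Int × Int) :=
  let nx := c.1 + d.1
  let ny := c.2 + d.2
  if nx < mnx ∨ nx > mxx ∨ ny < mny ∨ ny > mxy then s
  else if (nx, ny) ∈ ext ∨ (nx, ny) ∈ s.2 then s
  else (s.1 ++ [(nx, ny)], PySem.Set.add s.2 (nx, ny))

-- A's 'while q:' loop; the fuel passed below is proved sufficient (pvBfs_main), so the
-- fuel-exhaustion branch is never taken on the fuel the port uses.
def pvBfs (mnx mxx mny mxy : Int) (ext : List (Int × Int)) :
    Nat → List (Int × Int) → PySem.Set (Int × Int) → PySem.Set (Int × Int)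
  | 0, _, vis => vis
  | _ + 1, [], vis => vis
  | fuel + 1, c :: q, vis =>
    let st := pvDirsA.foldl (pvBfsStep mnx mxx mny mxy ext c) (q, vis)
    pvBfs mnx mxx mny mxy ext fuel st.1 st.2

def hole_count (rows : List String) : Int :=
  let cells := (pvParseRows rows).1
  match pvBbox cells with
  | none => 0   -- Python raises ValueError here; excluded by Pre_
  | some (a, b, c, d) =>
    let mnx := a - 1
    let mxx := b + 1
    let mny := c - 1
    let mxy := d + 1
    let ext := cells
    let fuel := 2 * ((mxx - mnx + 1).toNat * (mxy - mny + 1).toNat + 1) + 1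
    let vis := pvBfs mnx mxx mny mxy ext fuel [(mnx, mny)]
      (PySem.Set.add PySem.Set.empty (mnx, mny))
    (PySem.List.pyRange mny (mxy + 1) 1).foldl (fun holes y =>
      (PySem.List.pyRange mnx (mxx + 1) 1).foldl (fun holes x =>
        if (x, y) ∉ ext ∧ (x, y) ∉ vis then holes + 1 else holes) holes) 0

-- ===== PORT B =====
def pvCellsB (rows : List String) : PySem.Set (Int × Int) :=
  PySem.Set.ofList ((PySem.List.enumerate rows 0).flatMap (fun yr =>
    (PySem.List.enumerate yr.2.toList 0).filterMap (fun xc =>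
      if xc.2 = '1' then some (xc.1, yr.1) else none)))

def pvSweepCell (cells : List (Int × Int))
    (st : PySem.Set (Int × Int) × Bool) (p : Int × Int) :
    PySem.Set (Int × Int) × Bool :=
  if p ∈ cells ∨ p ∈ st.1 then st
  else if (p.1 - 1, p.2) ∈ st.1 ∨ (p.1 + 1, p.2) ∈ st.1 ∨
          (p.1, p.2 - 1) ∈ st.1 ∨ (p.1, p.2 + 1) ∈ st.1 then
    (PySem.Set.add st.1 p, true)
  else st

def pvSweep (mnx mxx mny mxy : Int) (cells : List (Int × Int))
    (st : PySem.Set (Int × Int) × Bool) : PySem.Set (Int × Int) × Bool :=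
  (PySem.List.pyRange mny (mxy + 1) 1).foldl (fun st y =>
    (PySem.List.pyRange mnx (mxx + 1) 1).foldl (fun st x =>
      pvSweepCell cells st (x, y)) st) st

-- B's 'while True:' loop; the fuel passed below is proved sufficient (pvSaturate_main).
def pvSaturate (mnx mxx mny mxy : Int) (cells : List (Int × Int)) :
    Nat → PySem.Set (Int × Int) → PySem.Set (Int × Int)
  | 0, vis => vis
  | fuel + 1, vis =>
    let st := pvSweep mnx mxx mny mxy cells (vis, false)
    if st.2 then pvSaturate mnx mxx mny mxy cells fuel st.1 else vis

def hole_count_alt (rows : List String) : Int :=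
  let cells := pvCellsB rows
  match PySem.List.min? (cells.map (fun c => c.1)) (fun v => v),
        PySem.List.max? (cells.map (fun c => c.1)) (fun v => v),
        PySem.List.min? (cells.map (fun c => c.2)) (fun v => v),
        PySem.List.max? (cells.map (fun c => c.2)) (fun v => v) with
  | some a, some b, some c, some d =>
    let mnx := a - 1
    let mxx := b + 1
    let mny := c - 1
    let mxy := d + 1
    let fuel := (mxx - mnx + 1).toNat * (mxy - mny + 1).toNat + 2
    let vis := pvSaturate mnx mxx mny mxy cells fuel
      (PySem.Set.add PySem.Set.empty (mnx, mny))
    (PySem.List.pyRange mny (mxy + 1) 1).foldl (fun holes y =>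
      (PySem.List.pyRange mnx (mxx + 1) 1).foldl (fun holes x =>
        if (x, y) ∉ cells ∧ (x, y) ∉ vis then holes + 1 else holes) holes) 0
  | _, _, _, _ => 0   -- Python raises ValueError here; excluded by Pre_

-- ===== PRECONDITION & SPEC =====
-- Pre_ excludes exactly the inputs with no '1' cell, on which A (and B) raise
-- ValueError: min() of an empty sequence.
def Pre_hole_count (rows : List String) : Prop := ∃ r ∈ rows, '1' ∈ r.toList
instance (rows : List String) : Decidable (Pre_hole_count rows) := by
  unfold Pre_hole_count; infer_instance

def pvWitness_hole_count : List String := ["11", "1 1", "11"]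

def Spec_hole_count (rows : List String) (out : Int) : Prop := out = hole_count_alt rows
instance (rows : List String) (out : Int) : Decidable (Spec_hole_count rows out) := by
  unfold Spec_hole_count; infer_instance

-- ===== CLAIM (what is proved, stated in full; the proofs are below) =====
def Claim_equal_hole_count : Prop := ∀ (rows : List String), Dom_hole_count rows →
  Pre_hole_count rows → Spec_hole_count rows (hole_count rows)

-- ===== LEMMAS AND PROOFS =====

-- basic geometry
def pvInBox (mnx mxx mny mxy : Int) (p : Int × Int) : Prop :=
  mnx ≤ p.1 ∧ p.1 ≤ mxx ∧ mny ≤ p.2 ∧ p.2 ≤ mxy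

def pvAdj (p q : Int × Int) : Prop :=
  q = (p.1 + 1, p.2) ∨ q = (p.1 - 1, p.2) ∨ q = (p.1, p.2 + 1) ∨ q = (p.1, p.2 - 1)

-- cells reachable from the padded corner through empty in-box cells
inductive pvReach (mnx mxx mny mxy : Int) (ext : List (Int × Int)) : Int × Int → Prop
  | corner : pvReach mnx mxx mny mxy ext (mnx, mny)
  | step (p q : Int × Int) : pvReach mnx mxx mny mxy ext p → pvAdj p q →
      pvInBox mnx mxx mny mxy q → q ∉ ext → pvReach mnx mxx mny mxy ext q

def pvBoxList (mnx mxx mny mxy : Int) : List (Int × Int) :=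
  (PySem.List.pyRange mny (mxy + 1) 1).flatMap (fun y =>
    (PySem.List.pyRange mnx (mxx + 1) 1).map (fun x => (x, y)))

def pvBoundN (mnx mxx mny mxy : Int) : Nat :=
  (mxx - mnx + 1).toNat * (mxy - mny + 1).toNat + 1

lemma pv_mem_boxList (mnx mxx mny mxy : Int) (p : Int × Int) :
    p ∈ pvBoxList mnx mxx mny mxy ↔ pvInBox mnx mxx mny mxy p := by
  obtain ⟨px, py⟩ := p
  simp only [pvBoxList, List.mem_flatMap, List.mem_map, PySem.List.mem_pyRange_one,
    pvInBox, Prod.mk.injEq]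
  constructor
  · rintro ⟨y, hy, x, hx, rfl, rfl⟩; omega
  · rintro ⟨h1, h2, h3, h4⟩; exact ⟨py, by omega, px, by omega, rfl, rfl⟩

lemma pv_length_boxList (mnx mxx mny mxy : Int) :
    (pvBoxList mnx mxx mny mxy).length + 1 = pvBoundN mnx mxx mny mxy := by
  unfold pvBoxList pvBoundN
  rw [List.length_flatMap]
  simp only [List.length_map, PySem.List.length_pyRange_one]
  rw [PySem.List.sum_map_const_nat, PySem.List.length_pyRange_one]
  have h1 : (mxy + 1 - mny).toNat = (mxy - mny + 1).toNat := by omega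
  have h2 : (mxx + 1 - mnx).toNat = (mxx - mnx + 1).toNat := by omega
  rw [h1, h2, Nat.mul_comm]

lemma pv_nodup_length_le {α : Type} [DecidableEq α] (l1 l2 : List α)
    (h : l1.Nodup) (hs : l1 ⊆ l2) : l1.length ≤ l2.length := by
  calc l1.length = l1.toFinset.card := (List.toFinset_card_of_nodup h).symm
    _ ≤ l2.toFinset.card := Finset.card_le_card (fun x hx => by
        simp only [List.mem_toFinset] at *; exact hs hx)
    _ ≤ l2.length := l2.toFinset_card_le

lemma pv_nodup_snoc {α : Type} {l : List α} {x : α} (h : l.Nodup) (hx : x ∉ l) :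
    (l ++ [x]).Nodup := by
  rw [← List.concat_eq_append]
  exact List.Nodup.concat hx h

lemma pv_vis_length_le (mnx mxx mny mxy : Int) (vis : List (Int × Int))
    (hnd : vis.Nodup) (hsub : ∀ p ∈ vis, p = (mnx, mny) ∨ pvInBox mnx mxx mny mxy p) :
    vis.length ≤ pvBoundN mnx mxx mny mxy := by
  have := pv_nodup_length_le vis ((mnx, mny) :: pvBoxList mnx mxx mny mxy) hnd
    (fun p hp => by
      rcases hsub p hp with h | h
      · simp [h]
      · simp [List.mem_cons, (pv_mem_boxList mnx mxx mny mxy p).2 h])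
  have h2 := pv_length_boxList mnx mxx mny mxy
  simp only [List.length_cons] at this
  omega

lemma pv_reach_subset (mnx mxx mny mxy : Int) (ext S : List (Int × Int))
    (hc : (mnx, mny) ∈ S)
    (hcl : ∀ p ∈ S, ∀ r, pvAdj p r → pvInBox mnx mxx mny mxy r → r ∉ ext → r ∈ S) :
    ∀ p, pvReach mnx mxx mny mxy ext p → p ∈ S := by
  intro p h
  induction h with
  | corner => exact hc
  | step p q _ hadj hbox hext ih => exact hcl p ih q hadj hbox hext

lemma pv_adj_of_dir (c d : Int × Int) (hd : d ∈ pvDirsA) :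
    pvAdj c (c.1 + d.1, c.2 + d.2) := by
  simp only [pvDirsA, List.mem_cons, List.not_mem_nil, or_false] at hd
  rcases hd with rfl | rfl | rfl | rfl <;> simp [pvAdj, Prod.ext_iff] <;> omega
lemma pv_dir_of_adj (c r : Int × Int) (h : pvAdj c r) :
    ∃ d ∈ pvDirsA, r = (c.1 + d.1, c.2 + d.2) := by
  rcases h with rfl | rfl | rfl | rfl
  · exact ⟨(1, 0), by simp [pvDirsA], by simp⟩
  · exact ⟨(-1, 0), by simp [pvDirsA], by simp <;> omega⟩
  · exact ⟨(0, 1), by simp [pvDirsA], by simp⟩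
  · exact ⟨(0, -1), by simp [pvDirsA], by simp <;> omega⟩

lemma pv_adj_symm (p r : Int × Int) (h : pvAdj p r) : pvAdj r p := by
  obtain ⟨px, py⟩ := p; obtain ⟨rx, ry⟩ := r
  simp only [pvAdj, Prod.mk.injEq] at *
  omega

-- ===== BFS (port A) correctness =====
lemma pvBfsStep_eq (mnx mxx mny mxy : Int) (ext : List (Int × Int)) (c : Int × Int)
    (s : List (Int × Int) × PySem.Set (Int × Int)) (d : Int × Int) :
    pvBfsStep mnx mxx mny mxy ext c s d =
      if c.1 + d.1 < mnx ∨ c.1 + d.1 > mxx ∨ c.2 + d.2 < mny ∨ c.2 + d.2 > mxy then s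
      else if (c.1 + d.1, c.2 + d.2) ∈ ext ∨ (c.1 + d.1, c.2 + d.2) ∈ s.2 then s
      else (s.1 ++ [(c.1 + d.1, c.2 + d.2)], PySem.Set.add s.2 (c.1 + d.1, c.2 + d.2)) := rfl

lemma pvBfs_inner (mnx mxx mny mxy : Int) (ext : List (Int × Int)) (c : Int × Int) :
    ∀ (ds : List (Int × Int)) (q0 : List (Int × Int)) (vis0 : PySem.Set (Int × Int)),
      vis0.Nodup →
      ∃ new : List (Int × Int),
        (ds.foldl (pvBfsStep mnx mxx mny mxy ext c) (q0, vis0)) = (q0 ++ new, vis0 ++ new) ∧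
        (∀ r ∈ new, (∃ d ∈ ds, r = (c.1 + d.1, c.2 + d.2)) ∧
          pvInBox mnx mxx mny mxy r ∧ r ∉ ext ∧ r ∉ vis0) ∧
        (vis0 ++ new).Nodup ∧
        (∀ d ∈ ds, pvInBox mnx mxx mny mxy (c.1 + d.1, c.2 + d.2) →
          (c.1 + d.1, c.2 + d.2) ∉ ext → (c.1 + d.1, c.2 + d.2) ∈ vis0 ++ new) := by
  intro ds
  induction ds with
  | nil =>
    intro q0 vis0 hnd
    exact ⟨[], by simp, by simp, by simpa, by simp⟩
  | cons d ds ih =>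
    intro q0 vis0 hnd
    rw [List.foldl_cons]
    by_cases hbox : (c.1 + d.1 < mnx ∨ c.1 + d.1 > mxx ∨ c.2 + d.2 < mny ∨ c.2 + d.2 > mxy)
    · have he : pvBfsStep mnx mxx mny mxy ext c (q0, vis0) d = (q0, vis0) := by
        rw [pvBfsStep_eq]; rw [if_pos hbox]
      rw [he]
      obtain ⟨new, e1, e2, e3, e4⟩ := ih q0 vis0 hnd
      refine ⟨new, e1, ?_, e3, ?_⟩
      · intro r hr
        obtain ⟨⟨d', hd', hr'⟩, h2, h3, h4⟩ := e2 r hr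
        exact ⟨⟨d', List.mem_cons_of_mem _ hd', hr'⟩, h2, h3, h4⟩
      · intro d' hd' hb hext
        rcases List.mem_cons.mp hd' with rfl | hd'
        · exact absurd hbox (by obtain ⟨a1, a2, a3, a4⟩ := hb; simp only [not_or]; omega)
        · exact e4 d' hd' hb hext
    · by_cases hocc : ((c.1 + d.1, c.2 + d.2) ∈ ext ∨ (c.1 + d.1, c.2 + d.2) ∈ vis0)
      · have he : pvBfsStep mnx mxx mny mxy ext c (q0, vis0) d = (q0, vis0) := by
          rw [pvBfsStep_eq]; rw [if_neg hbox, if_pos hocc]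
        rw [he]
        obtain ⟨new, e1, e2, e3, e4⟩ := ih q0 vis0 hnd
        refine ⟨new, e1, ?_, e3, ?_⟩
        · intro r hr
          obtain ⟨⟨d', hd', hr'⟩, h2, h3, h4⟩ := e2 r hr
          exact ⟨⟨d', List.mem_cons_of_mem _ hd', hr'⟩, h2, h3, h4⟩
        · intro d' hd' hb hext
          rcases List.mem_cons.mp hd' with rfl | hd'
          · rcases hocc with hocc | hocc
            · exact absurd hocc hext
            · exact List.mem_append_left _ hocc
          · exact e4 d' hd' hb hext
      · have hnv : (c.1 + d.1, c.2 + d.2) ∉ vis0 := fun h => hocc (Or.inr h)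
        have he : pvBfsStep mnx mxx mny mxy ext c (q0, vis0) d =
            (q0 ++ [(c.1 + d.1, c.2 + d.2)], vis0 ++ [(c.1 + d.1, c.2 + d.2)]) := by
          rw [pvBfsStep_eq]; rw [if_neg hbox, if_neg hocc]
          simp [PySem.Set.add_of_not_mem hnv]
        rw [he]
        have hnd' : (vis0 ++ [(c.1 + d.1, c.2 + d.2)]).Nodup := pv_nodup_snoc hnd hnv
        obtain ⟨new', e1, e2, e3, e4⟩ := ih (q0 ++ [(c.1 + d.1, c.2 + d.2)])
          (vis0 ++ [(c.1 + d.1, c.2 + d.2)]) hnd'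
        refine ⟨(c.1 + d.1, c.2 + d.2) :: new', ?_, ?_, ?_, ?_⟩
        · rw [e1]; simp
        · intro r hr
          rcases List.mem_cons.mp hr with rfl | hr
          · refine ⟨⟨d, List.mem_cons_self, rfl⟩, ?_, fun h => hocc (Or.inl h), hnv⟩
            simp only [not_or] at hbox
            exact ⟨by simp; omega, by simp; omega, by simp; omega, by simp; omega⟩
          · obtain ⟨⟨d', hd', hr'⟩, h2, h3, h4⟩ := e2 r hr
            refine ⟨⟨d', List.mem_cons_of_mem _ hd', hr'⟩, h2, h3, ?_⟩
            exact fun h => h4 (List.mem_append_left _ h)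
        · have := e3
          rwa [List.append_assoc, List.singleton_append] at this
        · intro d' hd' hb hext
          rcases List.mem_cons.mp hd' with rfl | hd'
          · simp
          · have := e4 d' hd' hb hext
            rwa [List.append_assoc, List.singleton_append] at this

lemma pvBfs_main (mnx mxx mny mxy : Int) (ext : List (Int × Int)) :
    ∀ (fuel : Nat) (q : List (Int × Int)) (vis : PySem.Set (Int × Int)),
      (∀ p ∈ q, p ∈ vis) →
      (∀ p ∈ vis, pvReach mnx mxx mny mxy ext p) →
      (∀ p ∈ vis, p ∉ q → ∀ r, pvAdj p r → pvInBox mnx mxx mny mxy r → r ∉ ext → r ∈ vis) →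
      vis.Nodup →
      (∀ p ∈ vis, p = (mnx, mny) ∨ pvInBox mnx mxx mny mxy p) →
      2 * pvBoundN mnx mxx mny mxy + q.length ≤ fuel + 2 * vis.length →
      (∀ p ∈ vis, p ∈ pvBfs mnx mxx mny mxy ext fuel q vis) ∧
      (∀ p ∈ pvBfs mnx mxx mny mxy ext fuel q vis, pvReach mnx mxx mny mxy ext p) ∧
      (∀ p ∈ pvBfs mnx mxx mny mxy ext fuel q vis, ∀ r, pvAdj p r →
        pvInBox mnx mxx mny mxy r → r ∉ ext → r ∈ pvBfs mnx mxx mny mxy ext fuel q vis) := by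
  intro fuel
  induction fuel with
  | zero =>
    intro q vis h1 h2 h3 h4 h5 h6
    have hlen := pv_vis_length_le mnx mxx mny mxy vis h4 h5
    have hq : q = [] := List.eq_nil_iff_length_eq_zero.mpr (by omega)
    subst hq
    refine ⟨fun p hp => hp, h2, fun p hp r ha hb he => h3 p hp (by simp) r ha hb he⟩
  | succ f ih =>
    intro q vis h1 h2 h3 h4 h5 h6
    cases q with
    | nil =>
      refine ⟨fun p hp => hp, h2, fun p hp r ha hb he => h3 p hp (by simp) r ha hb he⟩
    | cons cc qt =>
      obtain ⟨new, e1, e2, e3, e4⟩ := pvBfs_inner mnx mxx mny mxy ext cc pvDirsA qt vis h4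
      have hbfs : pvBfs mnx mxx mny mxy ext (f + 1) (cc :: qt) vis =
          pvBfs mnx mxx mny mxy ext f (qt ++ new) (vis ++ new) := by
        simp only [pvBfs, e1]
      have hcc : cc ∈ vis := h1 cc List.mem_cons_self
      have hq' : ∀ p ∈ qt ++ new, p ∈ vis ++ new := by
        intro p hp
        rcases List.mem_append.mp hp with hp | hp
        · exact List.mem_append_left _ (h1 p (List.mem_cons_of_mem _ hp))
        · exact List.mem_append_right _ hp
      have hr' : ∀ p ∈ vis ++ new, pvReach mnx mxx mny mxy ext p := by
        intro p hp
        rcases List.mem_append.mp hp with hp | hp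
        · exact h2 p hp
        · obtain ⟨⟨d, hd, rfl⟩, hbx, hext, _⟩ := e2 p hp
          exact pvReach.step cc _ (h2 cc hcc) (pv_adj_of_dir cc d hd) hbx hext
      have hcl' : ∀ p ∈ vis ++ new, p ∉ qt ++ new → ∀ r, pvAdj p r →
          pvInBox mnx mxx mny mxy r → r ∉ ext → r ∈ vis ++ new := by
        intro p hp hpq r hadj hbx hext
        rcases List.mem_append.mp hp with hp | hp
        · by_cases hpc : p = cc
          · subst hpc
            obtain ⟨d, hd, rfl⟩ := pv_dir_of_adj p r hadj
            exact e4 d hd hbx hext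
          · have hpqt : p ∉ cc :: qt := by
              intro hmem
              rcases List.mem_cons.mp hmem with h | h
              · exact hpc h
              · exact hpq (List.mem_append_left _ h)
            exact List.mem_append_left _ (h3 p hp hpqt r hadj hbx hext)
        · exact absurd (List.mem_append_right qt hp) hpq
      have hsub' : ∀ p ∈ vis ++ new, p = (mnx, mny) ∨ pvInBox mnx mxx mny mxy p := by
        intro p hp
        rcases List.mem_append.mp hp with hp | hp
        · exact h5 p hp
        · exact Or.inr (e2 p hp).2.1
      have hfuel' : 2 * pvBoundN mnx mxx mny mxy + (qt ++ new).length ≤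
          f + 2 * (vis ++ new).length := by
        simp only [List.length_append]
        simp only [List.length_cons] at h6
        omega
      obtain ⟨c1, c2, c3⟩ := ih (qt ++ new) (vis ++ new) hq' hr' hcl' e3 hsub' hfuel'
      rw [hbfs]
      exact ⟨fun p hp => c1 p (List.mem_append_left _ hp), c2, c3⟩

-- ===== sweep (port B) correctness =====
lemma pvSweep_eq_foldl (mnx mxx mny mxy : Int) (cells : List (Int × Int))
    (st : PySem.Set (Int × Int) × Bool) :
    pvSweep mnx mxx mny mxy cells st =
      (pvBoxList mnx mxx mny mxy).foldl (pvSweepCell cells) st := by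
  rw [pvBoxList, List.foldl_flatMap]
  unfold pvSweep
  apply PySem.List.foldl_congr_mem
  intro acc y _
  rw [List.foldl_map]

lemma pvSweepCell_skip (cells : List (Int × Int)) (st : PySem.Set (Int × Int) × Bool)
    (p : Int × Int) (h : p ∈ cells ∨ p ∈ st.1) : pvSweepCell cells st p = st := by
  unfold pvSweepCell; rw [if_pos h]

lemma pvSweepCell_idle (cells : List (Int × Int)) (st : PySem.Set (Int × Int) × Bool)
    (p : Int × Int) (h1 : ¬ (p ∈ cells ∨ p ∈ st.1))
    (h2 : ¬ ((p.1 - 1, p.2) ∈ st.1 ∨ (p.1 + 1, p.2) ∈ st.1 ∨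
             (p.1, p.2 - 1) ∈ st.1 ∨ (p.1, p.2 + 1) ∈ st.1)) :
    pvSweepCell cells st p = st := by
  unfold pvSweepCell; rw [if_neg h1, if_neg h2]

lemma pvSweepCell_add (cells : List (Int × Int)) (st : PySem.Set (Int × Int) × Bool)
    (p : Int × Int) (h1 : ¬ (p ∈ cells ∨ p ∈ st.1))
    (h2 : (p.1 - 1, p.2) ∈ st.1 ∨ (p.1 + 1, p.2) ∈ st.1 ∨
          (p.1, p.2 - 1) ∈ st.1 ∨ (p.1, p.2 + 1) ∈ st.1) :
    pvSweepCell cells st p = (st.1 ++ [p], true) := by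
  unfold pvSweepCell
  rw [if_neg h1, if_pos h2, PySem.Set.add_of_not_mem (fun h => h1 (Or.inr h))]

lemma pvSweep_shape (cells : List (Int × Int)) :
    ∀ (l : List (Int × Int)) (st : PySem.Set (Int × Int) × Bool),
      ∃ new : List (Int × Int),
        (l.foldl (pvSweepCell cells) st).1 = st.1 ++ new ∧
        (∀ r ∈ new, r ∈ l ∧ r ∉ cells) ∧
        (st.1.Nodup → (st.1 ++ new).Nodup) ∧
        (st.2 = true → (l.foldl (pvSweepCell cells) st).2 = true) ∧
        ((l.foldl (pvSweepCell cells) st).2 = true → st.2 = true ∨ new ≠ []) := by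
  intro l
  induction l with
  | nil =>
    intro st
    exact ⟨[], by simp, by simp, by simp, fun h => h, fun h => Or.inl h⟩
  | cons x t ih =>
    intro st
    rw [List.foldl_cons]
    by_cases h1 : x ∈ cells ∨ x ∈ st.1
    · rw [pvSweepCell_skip cells st x h1]
      obtain ⟨new, e1, e2, e3, e4, e5⟩ := ih st
      exact ⟨new, e1, fun r hr => ⟨List.mem_cons_of_mem _ (e2 r hr).1, (e2 r hr).2⟩, e3, e4, e5⟩
    · by_cases h2 : (x.1 - 1, x.2) ∈ st.1 ∨ (x.1 + 1, x.2) ∈ st.1 ∨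
          (x.1, x.2 - 1) ∈ st.1 ∨ (x.1, x.2 + 1) ∈ st.1
      · rw [pvSweepCell_add cells st x h1 h2]
        obtain ⟨new', e1, e2, e3, e4, e5⟩ := ih (st.1 ++ [x], true)
        refine ⟨x :: new', ?_, ?_, ?_, ?_, ?_⟩
        · rw [e1]; simp
        · intro r hr
          rcases List.mem_cons.mp hr with rfl | hr
          · exact ⟨List.mem_cons_self, fun h => h1 (Or.inl h)⟩
          · exact ⟨List.mem_cons_of_mem _ (e2 r hr).1, (e2 r hr).2⟩
        · intro hnd
          have hx : x ∉ st.1 := fun h => h1 (Or.inr h)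
          have := e3 (pv_nodup_snoc hnd hx)
          rwa [List.append_assoc, List.singleton_append] at this
        · intro _; exact e4 rfl
        · intro _; exact Or.inr (List.cons_ne_nil _ _)
      · rw [pvSweepCell_idle cells st x h1 h2]
        obtain ⟨new, e1, e2, e3, e4, e5⟩ := ih st
        exact ⟨new, e1, fun r hr => ⟨List.mem_cons_of_mem _ (e2 r hr).1, (e2 r hr).2⟩, e3, e4, e5⟩

lemma pvSweep_reach (mnx mxx mny mxy : Int) (cells : List (Int × Int)) :
    ∀ (l : List (Int × Int)) (st : PySem.Set (Int × Int) × Bool),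
      (∀ r ∈ l, pvInBox mnx mxx mny mxy r) →
      (∀ p ∈ st.1, pvReach mnx mxx mny mxy cells p) →
      ∀ p ∈ (l.foldl (pvSweepCell cells) st).1, pvReach mnx mxx mny mxy cells p := by
  intro l
  induction l with
  | nil => intro st _ hst p hp; exact hst p hp
  | cons x t ih =>
    intro st hl hst
    rw [List.foldl_cons]
    by_cases h1 : x ∈ cells ∨ x ∈ st.1
    · rw [pvSweepCell_skip cells st x h1]
      exact ih st (fun r hr => hl r (List.mem_cons_of_mem _ hr)) hst
    · by_cases h2 : (x.1 - 1, x.2) ∈ st.1 ∨ (x.1 + 1, x.2) ∈ st.1 ∨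
          (x.1, x.2 - 1) ∈ st.1 ∨ (x.1, x.2 + 1) ∈ st.1
      · rw [pvSweepCell_add cells st x h1 h2]
        refine ih _ (fun r hr => hl r (List.mem_cons_of_mem _ hr)) ?_
        intro p hp
        rcases List.mem_append.mp hp with hp | hp
        · exact hst p hp
        · rw [List.mem_singleton] at hp
          subst hp
          have hbx : pvInBox mnx mxx mny mxy p := hl p List.mem_cons_self
          have hext : p ∉ cells := fun h => h1 (Or.inl h)
          obtain ⟨px, py⟩ := p
          rcases h2 with h | h | h | h
          · exact pvReach.step _ _ (hst _ h) (Or.inl (by simp)) hbx hext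
          · exact pvReach.step _ _ (hst _ h)
              (Or.inr (Or.inl (by simp))) hbx hext
          · exact pvReach.step _ _ (hst _ h)
              (Or.inr (Or.inr (Or.inl (by simp)))) hbx hext
          · exact pvReach.step _ _ (hst _ h)
              (Or.inr (Or.inr (Or.inr (by simp)))) hbx hext
      · rw [pvSweepCell_idle cells st x h1 h2]
        exact ih st (fun r hr => hl r (List.mem_cons_of_mem _ hr)) hst

lemma pvSweep_false (cells : List (Int × Int)) :
    ∀ (l : List (Int × Int)) (st : PySem.Set (Int × Int) × Bool),
      (l.foldl (pvSweepCell cells) st).2 = false →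
      (l.foldl (pvSweepCell cells) st).1 = st.1 ∧ st.2 = false := by
  intro l
  induction l with
  | nil => intro st h; exact ⟨rfl, h⟩
  | cons x t ih =>
    intro st h
    rw [List.foldl_cons] at h ⊢
    by_cases h1 : x ∈ cells ∨ x ∈ st.1
    · rw [pvSweepCell_skip cells st x h1] at h ⊢; exact ih st h
    · by_cases h2 : (x.1 - 1, x.2) ∈ st.1 ∨ (x.1 + 1, x.2) ∈ st.1 ∨
          (x.1, x.2 - 1) ∈ st.1 ∨ (x.1, x.2 + 1) ∈ st.1
      · rw [pvSweepCell_add cells st x h1 h2] at h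
        exact absurd (ih _ h).2 (by simp)
      · rw [pvSweepCell_idle cells st x h1 h2] at h ⊢; exact ih st h

lemma pvSweep_closed (cells : List (Int × Int)) :
    ∀ (l : List (Int × Int)) (st : PySem.Set (Int × Int) × Bool),
      (l.foldl (pvSweepCell cells) st).2 = false →
      ∀ p ∈ l, p ∉ cells →
        ((p.1 - 1, p.2) ∈ st.1 ∨ (p.1 + 1, p.2) ∈ st.1 ∨
         (p.1, p.2 - 1) ∈ st.1 ∨ (p.1, p.2 + 1) ∈ st.1) → p ∈ st.1 := by
  intro l
  induction l with
  | nil => intro st _ p hp; exact absurd hp (List.not_mem_nil)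
  | cons x t ih =>
    intro st hfalse p hp hcells hnb
    rw [List.foldl_cons] at hfalse
    by_cases h1 : x ∈ cells ∨ x ∈ st.1
    · rw [pvSweepCell_skip cells st x h1] at hfalse
      rcases List.mem_cons.mp hp with rfl | hp
      · rcases h1 with h1 | h1
        · exact absurd h1 hcells
        · exact h1
      · exact ih st hfalse p hp hcells hnb
    · by_cases h2 : (x.1 - 1, x.2) ∈ st.1 ∨ (x.1 + 1, x.2) ∈ st.1 ∨
          (x.1, x.2 - 1) ∈ st.1 ∨ (x.1, x.2 + 1) ∈ st.1
      · rw [pvSweepCell_add cells st x h1 h2] at hfalse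
        exact absurd (pvSweep_false cells t _ hfalse).2 (by simp)
      · rw [pvSweepCell_idle cells st x h1 h2] at hfalse
        rcases List.mem_cons.mp hp with rfl | hp
        · exact absurd hnb h2
        · exact ih st hfalse p hp hcells hnb

lemma pvSaturate_main (mnx mxx mny mxy : Int) (cells : List (Int × Int)) :
    ∀ (fuel : Nat) (vis : PySem.Set (Int × Int)),
      vis.Nodup →
      (∀ p ∈ vis, p = (mnx, mny) ∨ pvInBox mnx mxx mny mxy p) →
      (mnx, mny) ∈ vis →
      (∀ p ∈ vis, pvReach mnx mxx mny mxy cells p) →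
      pvBoundN mnx mxx mny mxy + 1 ≤ fuel + vis.length →
      ∀ p, p ∈ pvSaturate mnx mxx mny mxy cells fuel vis ↔
        pvReach mnx mxx mny mxy cells p := by
  intro fuel
  induction fuel with
  | zero =>
    intro vis hnd hsub hc hr hfuel
    have hlen := pv_vis_length_le mnx mxx mny mxy vis hnd hsub
    omega
  | succ f ih =>
    intro vis hnd hsub hc hr hfuel
    have hsat : pvSaturate mnx mxx mny mxy cells (f + 1) vis =
        (if (pvSweep mnx mxx mny mxy cells (vis, false)).2 then
          pvSaturate mnx mxx mny mxy cells f (pvSweep mnx mxx mny mxy cells (vis, false)).1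
        else vis) := rfl
    rw [hsat, pvSweep_eq_foldl]
    obtain ⟨new, e1, e2, e3, e4, e5⟩ :=
      pvSweep_shape cells (pvBoxList mnx mxx mny mxy) (vis, false)
    by_cases hflag : ((pvBoxList mnx mxx mny mxy).foldl (pvSweepCell cells) (vis, false)).2 = true
    · rw [if_pos hflag]
      have hnew : new ≠ [] := by
        rcases e5 hflag with h | h
        · exact absurd h (by simp)
        · exact h
      apply ih
      · rw [e1]; exact e3 hnd
      · rw [e1]
        intro p hp
        rcases List.mem_append.mp hp with hp | hp
        · exact hsub p hp
        · exact Or.inr ((pv_mem_boxList mnx mxx mny mxy p).mp (e2 p hp).1)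
      · rw [e1]; exact List.mem_append_left _ hc
      · exact pvSweep_reach mnx mxx mny mxy cells (pvBoxList mnx mxx mny mxy) (vis, false)
          (fun r hr' => (pv_mem_boxList mnx mxx mny mxy r).mp hr') hr
      · rw [e1, List.length_append]
        have h1 : 1 ≤ new.length := List.length_pos_iff.mpr hnew
        have h2 : ((vis, false).1 : List (Int × Int)).length = vis.length := rfl
        omega
    · rw [if_neg hflag]
      have hfalse : ((pvBoxList mnx mxx mny mxy).foldl (pvSweepCell cells) (vis, false)).2 = false :=
        Bool.not_eq_true _ ▸ (by revert hflag; cases ((pvBoxList mnx mxx mny mxy).foldl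
          (pvSweepCell cells) (vis, false)).2 <;> simp)
      intro p
      constructor
      · exact hr p
      · apply pv_reach_subset mnx mxx mny mxy cells vis hc
        intro a ha r hadj hbx hext
        have hrL : r ∈ pvBoxList mnx mxx mny mxy := (pv_mem_boxList mnx mxx mny mxy r).mpr hbx
        apply pvSweep_closed cells (pvBoxList mnx mxx mny mxy) (vis, false) hfalse r hrL hext
        have hadj' := pv_adj_symm a r hadj
        rcases hadj' with h | h | h | h
        · exact Or.inr (Or.inl (h ▸ ha))
        · exact Or.inl (h ▸ ha)
        · exact Or.inr (Or.inr (Or.inr (h ▸ ha)))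
        · exact Or.inr (Or.inr (Or.inl (h ▸ ha)))

-- ===== the two parses build the same list =====
lemma pv_foldl_add_if {α β : Type} [BEq β] [LawfulBEq β]
    (p : α → Prop) [DecidablePred p] (g : α → β) :
    ∀ (l : List α) (s : PySem.Set β),
      l.foldl (fun s x => if p x then PySem.Set.add s (g x) else s) s =
        (l.filterMap (fun x => if p x then some (g x) else none)).foldl PySem.Set.add s := by
  intro l
  induction l with
  | nil => intro s; rfl
  | cons x t ih =>
    intro s
    by_cases h : p x <;> simp [h, ih]

lemma pv_cells_eq (rows : List String) : pvCellsB rows = (pvParseRows rows).1 := by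
  unfold pvCellsB pvParseRows
  rw [PySem.Set.ofList_eq_foldl, List.foldl_flatMap]
  apply PySem.List.foldl_congr_mem
  intro acc yr _
  exact (pv_foldl_add_if (fun xc : Int × Char => xc.2 = '1')
    (fun xc : Int × Char => (xc.1, yr.1)) _ acc).symm

-- ===== final counting congruence =====
lemma pv_count_congr (mnx mxx mny mxy : Int) (ext v1 v2 : List (Int × Int))
    (h : ∀ p, p ∈ v1 ↔ p ∈ v2) :
    ((PySem.List.pyRange mny (mxy + 1) 1).foldl (fun holes y =>
      (PySem.List.pyRange mnx (mxx + 1) 1).foldl (fun holes x =>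
        if (x, y) ∉ ext ∧ (x, y) ∉ v1 then holes + 1 else holes) holes) (0 : Int)) =
    ((PySem.List.pyRange mny (mxy + 1) 1).foldl (fun holes y =>
      (PySem.List.pyRange mnx (mxx + 1) 1).foldl (fun holes x =>
        if (x, y) ∉ ext ∧ (x, y) ∉ v2 then holes + 1 else holes) holes) (0 : Int)) := by
  apply PySem.List.foldl_congr_mem
  intro acc y _
  apply PySem.List.foldl_congr_mem
  intro acc2 x _
  simp only [h]

-- ===== VERDICT (by name: the statement is the Claim_ definition above) =====
theorem hole_count_spec : Claim_equal_hole_count := by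
  intro rows _hdom hpre
  unfold Spec_hole_count
  have hcells := pv_cells_eq rows
  obtain ⟨r, hr, h1⟩ := hpre
  obtain ⟨k, hk, hkv⟩ := List.mem_iff_getElem.mp h1
  obtain ⟨j, hj, hjv⟩ := List.mem_iff_getElem.mp hr
  have hrow : ((j : Int), r) ∈ PySem.List.enumerate rows 0 := by
    rw [PySem.List.mem_enumerate_iff]
    exact ⟨j, hj, by simp [hjv]⟩
  have hch : ((k : Int), '1') ∈ PySem.List.enumerate r.toList 0 := by
    rw [PySem.List.mem_enumerate_iff]
    exact ⟨k, hk, by simp [hkv]⟩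
  have hmemB : ((k : Int), (j : Int)) ∈ pvCellsB rows := by
    apply (PySem.Set.mem_ofList _ _).mpr
    exact List.mem_flatMap.mpr ⟨((j : Int), r), hrow,
      List.mem_filterMap.mpr ⟨((k : Int), '1'), hch, by simp⟩⟩
  have hmem : ((k : Int), (j : Int)) ∈ (pvParseRows rows).1 := hcells ▸ hmemB
  have hne : (pvParseRows rows).1 ≠ [] := List.ne_nil_of_mem hmem
  have hxs : (pvParseRows rows).1.map (fun c => c.1) ≠ [] := by
    simp [hne]
  have hys : (pvParseRows rows).1.map (fun c => c.2) ≠ [] := by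
    simp [hne]
  have hmn1 : PySem.List.min? ((pvParseRows rows).1.map (fun c => c.1)) (fun v => v) ≠ none :=
    fun h => hxs ((PySem.List.min?_eq_none_iff _ _).mp h)
  have hmx1 : PySem.List.max? ((pvParseRows rows).1.map (fun c => c.1)) (fun v => v) ≠ none :=
    fun h => hxs ((PySem.List.max?_eq_none_iff _ _).mp h)
  have hmn2 : PySem.List.min? ((pvParseRows rows).1.map (fun c => c.2)) (fun v => v) ≠ none :=
    fun h => hys ((PySem.List.min?_eq_none_iff _ _).mp h)
  have hmx2 : PySem.List.max? ((pvParseRows rows).1.map (fun c => c.2)) (fun v => v) ≠ none :=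
    fun h => hys ((PySem.List.max?_eq_none_iff _ _).mp h)
  obtain ⟨a, ha⟩ := Option.ne_none_iff_exists'.mp hmn1
  obtain ⟨b, hb⟩ := Option.ne_none_iff_exists'.mp hmx1
  obtain ⟨c, hcm⟩ := Option.ne_none_iff_exists'.mp hmn2
  obtain ⟨d, hd⟩ := Option.ne_none_iff_exists'.mp hmx2
  have hbbox : pvBbox (pvParseRows rows).1 = some (a, b, c, d) := by
    simp only [pvBbox]
    rw [ha, hb, hcm, hd]
  -- A's visited set equals reachability
  have hA := pvBfs_main (a - 1) (b + 1) (c - 1) (d + 1) (pvParseRows rows).1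
    (2 * ((b + 1 - (a - 1) + 1).toNat * (d + 1 - (c - 1) + 1).toNat + 1) + 1)
    [(a - 1, c - 1)] [(a - 1, c - 1)]
    (fun p hp => hp)
    (fun p hp => by rw [List.mem_singleton] at hp; subst hp; exact pvReach.corner)
    (fun p hp hq => absurd hp hq)
    (by simp)
    (fun p hp => by rw [List.mem_singleton] at hp; exact Or.inl hp)
    (by unfold pvBoundN; simp)
  obtain ⟨cA1, cA2, cA3⟩ := hA
  have hAiff : ∀ p, p ∈ pvBfs (a - 1) (b + 1) (c - 1) (d + 1) (pvParseRows rows).1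
      (2 * ((b + 1 - (a - 1) + 1).toNat * (d + 1 - (c - 1) + 1).toNat + 1) + 1)
      [(a - 1, c - 1)] [(a - 1, c - 1)] ↔
      pvReach (a - 1) (b + 1) (c - 1) (d + 1) (pvParseRows rows).1 p := by
    intro p
    constructor
    · exact cA2 p
    · exact pv_reach_subset (a - 1) (b + 1) (c - 1) (d + 1) (pvParseRows rows).1 _
        (cA1 _ (by simp)) cA3 p
  -- B's visited set equals reachability
  have hBiff := pvSaturate_main (a - 1) (b + 1) (c - 1) (d + 1) (pvParseRows rows).1
    ((b + 1 - (a - 1) + 1).toNat * (d + 1 - (c - 1) + 1).toNat + 2) [(a - 1, c - 1)]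
    (by simp)
    (fun p hp => by rw [List.mem_singleton] at hp; exact Or.inl hp)
    (by simp)
    (fun p hp => by rw [List.mem_singleton] at hp; subst hp; exact pvReach.corner)
    (by unfold pvBoundN; simp)
  -- reduce both sides and compare the two counting folds pointwise
  show hole_count rows = hole_count_alt rows
  simp only [hole_count, hole_count_alt, hcells, hbbox, ha, hb, hcm, hd]
  exact pv_count_congr (a - 1) (b + 1) (c - 1) (d + 1) (pvParseRows rows).1 _ _
    (fun p => (hAiff p).trans ((hBiff p).symm))
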